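-- pv_equiv track=rewrite | github.com/duo-labs/markflow | markflow/formatters/textwrap.py | space_split
-- ===== SOURCE A (Python) =====
-- from typing import List, Tuple
--
-- def space_split(
--     text: str, leading_space: bool
-- ) -> Tuple[List[str], List[bool], List[bool]]:
--     split_text: List[str] = []
--     leading_spaces: List[bool] = []
--     evaluates: List[bool] = []
--     for word in text.split(" "):
--         if not word:
--             continue
--         split_text.append(word.strip())
--         if not leading_spaces:
--             leading_spaces.append(leading_space)
--         else:
--             leading_spaces.append(True)
--         evaluates.append(True)
--
--     return split_text, leading_spaces, evaluates
-- ===== SOURCE B (Python) =====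
-- from typing import List, Tuple
--
-- def space_split(
--     text: str, leading_space: bool
-- ) -> Tuple[List[str], List[bool], List[bool]]:
--     # Character-level scanner: never calls str.split; walks the string once
--     # collecting maximal runs of non-' ' characters, then derives both flag
--     # lists in closed form from the word count.
--     words: List[str] = []
--     i, n = 0, len(text)
--     while i < n:
--         if text[i] == ' ':
--             i += 1
--             continue
--         j = i
--         while j < n and text[j] != ' ':
--             j += 1
--         words.append(text[i:j].strip())
--         i = j
--     m = len(words)
--     flags = [leading_space] + [True] * (m - 1) if m else []
--     return words, flags, [True] * m
-- ===== Notes on version B (the rewrite author's own statement) =====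
-- stated objective: alternative
-- what changed: B never calls str.split: it scans the string character by character with an index, collecting maximal runs of non-space characters as the words, and derives both flag lists in closed form from the word count instead of A's per-token loop with three interleaved appends and a first-element branch.
import Mathlib
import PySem

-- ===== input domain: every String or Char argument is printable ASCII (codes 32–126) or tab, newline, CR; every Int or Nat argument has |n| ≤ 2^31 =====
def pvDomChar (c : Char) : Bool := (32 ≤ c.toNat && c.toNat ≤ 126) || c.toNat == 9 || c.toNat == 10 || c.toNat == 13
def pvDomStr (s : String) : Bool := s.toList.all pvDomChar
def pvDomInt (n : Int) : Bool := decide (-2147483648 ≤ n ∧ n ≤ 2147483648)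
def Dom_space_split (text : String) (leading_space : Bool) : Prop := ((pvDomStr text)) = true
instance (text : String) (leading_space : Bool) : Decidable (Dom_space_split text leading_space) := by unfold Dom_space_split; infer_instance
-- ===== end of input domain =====

-- B replaces A's loop over text.split(" ") (three interleaved appends with a
-- first-element branch) by a character-level index scanner that collects
-- maximal runs of non-space characters and derives both flag lists in closed
-- form from the word count; objective: alternative.


-- ===== PORT A =====
-- one loop step of A: skip empty word, else append stripped word and the two flags
def spaceSplitStep (leading_space : Bool)
    (st : List String × List Bool × List Bool) (word : List Char) :
    List String × List Bool × List Bool :=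
  if word = [] then st
  else (st.1 ++ [String.ofList (PySem.Chars.strip word)],
        st.2.1 ++ [if st.2.1 = [] then leading_space else true],
        st.2.2 ++ [true])

def space_split (text : String) (leading_space : Bool) :
    List String × List Bool × List Bool :=
  (PySem.Chars.splitOn text.toList [' ']).foldl (spaceSplitStep leading_space) ([], [], [])

-- ===== PORT B =====
-- the scan conditions of Source B's two while loops: text[k] != ' '
def notSpace (c : Char) : Bool := c ≠ ' '

-- Source B's outer while loop: at a space advance; otherwise the inner while loop
-- scans the maximal run of non-space characters (takeWhile/dropWhile), the run
-- is appended stripped, and scanning resumes after it.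
def ssWords : List Char → List String
  | [] => []
  | c :: cs =>
    if c = ' ' then ssWords cs
    else String.ofList (PySem.Chars.strip ((c :: cs).takeWhile notSpace))
           :: ssWords ((c :: cs).dropWhile notSpace)
  termination_by l => l.length
  decreasing_by
    · simp
    · simp only [List.dropWhile_cons]
      rw [if_pos (by simp [notSpace, ‹¬ c = ' '›])]
      have := List.length_dropWhile_le (p := notSpace) cs
      simp; omega

def space_split_alt (text : String) (leading_space : Bool) :
    List String × List Bool × List Bool :=
  let words := ssWords text.toList
  let m := words.length
  (words,
   if m = 0 then [] else leading_space :: List.replicate (m - 1) true,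
   List.replicate m true)

-- ===== PRECONDITION & SPEC =====
def Spec_space_split (text : String) (leading_space : Bool) (out : List String × List Bool × List Bool) : Prop := out = space_split_alt text leading_space
instance (text : String) (leading_space : Bool) (out : List String × List Bool × List Bool) : Decidable (Spec_space_split text leading_space out) := by unfold Spec_space_split; infer_instance

-- ===== CLAIM (what is proved, stated in full; the proofs are below) =====
def Claim_equal_space_split : Prop := ∀ (text : String) (leading_space : Bool), Dom_space_split text leading_space → Spec_space_split text leading_space (space_split text leading_space)

-- ===== LEMMAS AND PROOFS =====

-- reference version of str.split(" ") used to bridge the two ports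
def mySplit (l : List Char) : List (List Char) :=
  match h : l.dropWhile notSpace with
  | [] => [l.takeWhile notSpace]
  | _ :: r => l.takeWhile notSpace :: mySplit r
  termination_by l.length
  decreasing_by
    have := List.length_dropWhile_le (p := notSpace) l
    rw [h] at this; simp at this ⊢; omega

def prependFirst (p : List Char) : List (List Char) → List (List Char)
  | [] => [p]
  | x :: xs => (p ++ x) :: xs

theorem mySplit_eq (l : List Char) :
    mySplit l = match l.dropWhile notSpace with
      | [] => [l.takeWhile notSpace]
      | _ :: r => l.takeWhile notSpace :: mySplit r := by
  rw [mySplit.eq_def]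
  split
  · split <;> simp_all
  · split <;> simp_all

theorem mySplit_ne_nil (l : List Char) : mySplit l ≠ [] := by
  rw [mySplit_eq]; split <;> simp

theorem mySplit_nil : mySplit [] = [[]] := by
  rw [mySplit_eq]; simp

theorem mySplit_space_cons (l : List Char) : mySplit (' ' :: l) = [] :: mySplit l := by
  rw [mySplit_eq]
  simp [List.dropWhile_cons, List.takeWhile_cons, notSpace]

theorem mySplit_char_cons (c : Char) (l : List Char) (hc : c ≠ ' ') :
    mySplit (c :: l) =
      match mySplit l with
      | [] => [[c]]
      | x :: xs => (c :: x) :: xs := by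
  have hns : notSpace c = true := by simp [notSpace, hc]
  conv_lhs => rw [mySplit_eq]
  simp only [List.dropWhile_cons, List.takeWhile_cons, hns, if_pos hns]
  cases h : l.dropWhile notSpace with
  | nil =>
    have h1 : mySplit l = [l.takeWhile notSpace] := by
      rw [mySplit_eq, h]
    simp [h1]
  | cons d r =>
    have h1 : mySplit l = l.takeWhile notSpace :: mySplit r := by
      rw [mySplit_eq, h]
    simp [h1]

theorem prependFirst_char (p : List Char) (c : Char) (l : List Char) (hc : c ≠ ' ') :
    prependFirst p (mySplit (c :: l)) = prependFirst (p ++ [c]) (mySplit l) := by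
  rw [mySplit_char_cons c l hc]
  cases h : mySplit l with
  | nil => exact absurd h (mySplit_ne_nil l)
  | cons x xs => simp [prependFirst]

theorem dropWhile_cons_false {p : Char → Bool} {l : List Char} {d : Char} {r : List Char}
    (h : l.dropWhile p = d :: r) : p d = false := by
  induction l with
  | nil => simp at h
  | cons a t ih =>
    rw [List.dropWhile_cons] at h
    by_cases hp : p a = true
    · rw [if_pos hp] at h; exact ih h
    · rw [if_neg hp] at h
      cases h
      simpa using hp

theorem splitOn_go_eq (fuel : Nat) (l cur : List Char) (acc : List (List Char))
    (hf : l.length < fuel) :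
    PySem.Chars.splitOn.go [' '] fuel l cur acc =
      acc.reverse ++ prependFirst cur.reverse (mySplit l) := by
  induction fuel generalizing l cur acc with
  | zero => omega
  | succ f ih =>
    cases l with
    | nil =>
      simp [PySem.Chars.splitOn.go, mySplit_nil, prependFirst]
    | cons c rest =>
      rw [PySem.Chars.splitOn.go]
      by_cases hc : c = ' '
      · subst hc
        rw [if_pos (by simp [List.isPrefixOf])]
        rw [ih _ _ _ (by simp at hf ⊢; omega)]
        rw [mySplit_space_cons]
        cases h : mySplit rest with
        | nil => exact absurd h (mySplit_ne_nil rest)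
        | cons x xs => simp [prependFirst, h]
      · rw [if_neg (by simp [List.isPrefixOf]; exact fun hh => hc hh.symm)]
        rw [ih _ _ _ (by simp at hf ⊢; omega)]
        rw [prependFirst_char _ c rest hc]
        simp

theorem splitOn_eq_mySplit (l : List Char) :
    PySem.Chars.splitOn l [' '] = mySplit l := by
  unfold PySem.Chars.splitOn
  rw [splitOn_go_eq _ _ _ _ (by omega)]
  cases h : mySplit l with
  | nil => exact absurd h (mySplit_ne_nil l)
  | cons x xs => simp [prependFirst]

-- the nonempty tokens of mySplit
def toks (l : List Char) : List (List Char) := (mySplit l).filter (· ≠ [])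

theorem toks_nil : toks [] = [] := by
  unfold toks; rw [mySplit_nil]; rfl

theorem toks_space_cons (l : List Char) : toks (' ' :: l) = toks l := by
  unfold toks; rw [mySplit_space_cons]; simp

theorem toks_char_cons (c : Char) (l : List Char) (hc : c ≠ ' ') :
    toks (c :: l) = (c :: l).takeWhile notSpace :: toks ((c :: l).dropWhile notSpace) := by
  have hns : notSpace c = true := by simp [notSpace, hc]
  have hdW : (c :: l).dropWhile notSpace = l.dropWhile notSpace := by
    simp [List.dropWhile_cons, hns]
  have htW : (c :: l).takeWhile notSpace = c :: l.takeWhile notSpace := by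
    simp [List.takeWhile_cons, hns]
  unfold toks
  rw [mySplit_char_cons c l hc, hdW, htW]
  cases h : l.dropWhile notSpace with
  | nil =>
    have h1 : mySplit l = [l.takeWhile notSpace] := by
      rw [mySplit_eq]; rw [h]
    rw [h1, mySplit_nil]
    simp [List.filter_cons]
  | cons d r =>
    have hd : d = ' ' := by
      have := dropWhile_cons_false h
      simpa [notSpace] using this
    have h1 : mySplit l = l.takeWhile notSpace :: mySplit r := by
      rw [mySplit_eq]; rw [h]
    subst hd
    rw [h1, mySplit_space_cons]
    simp [List.filter_cons]

-- the scanner produces exactly the stripped nonempty tokens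
theorem ssWords_eq_toks (l : List Char) :
    ssWords l = (toks l).map (fun w => String.ofList (PySem.Chars.strip w)) := by
  induction l using ssWords.induct with
  | case1 => rw [ssWords, toks_nil]; rfl
  | case2 cs ih => rw [ssWords, if_pos rfl, toks_space_cons, ih]
  | case3 c cs hc ih =>
    rw [ssWords, if_neg hc, toks_char_cons c cs hc]
    simp [ih]

-- A's fold, once the flag list is nonempty, just appends words and all-true flags
theorem foldl_step_nonempty (ls : Bool) (l : List (List Char))
    (ws : List String) (f : Bool) (fs : List Bool) (es : List Bool) :
    l.foldl (spaceSplitStep ls) (ws, f :: fs, es) =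
      (ws ++ (l.filter (· ≠ [])).map (fun w => String.ofList (PySem.Chars.strip w)),
       (f :: fs) ++ List.replicate (l.filter (· ≠ [])).length true,
       es ++ List.replicate (l.filter (· ≠ [])).length true) := by
  induction l generalizing ws f fs es with
  | nil => simp
  | cons w t ih =>
    by_cases hw : w = [] <;>
      simp [spaceSplitStep, hw, ih, List.replicate_succ]

-- A's fold from the empty state, in closed form over the nonempty tokens
theorem foldl_step_empty (ls : Bool) (l : List (List Char)) :
    l.foldl (spaceSplitStep ls) ([], [], []) =
      (let words := (l.filter (· ≠ [])).map (fun w => String.ofList (PySem.Chars.strip w))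
       (words,
        if words.length = 0 then [] else ls :: List.replicate (words.length - 1) true,
        List.replicate words.length true)) := by
  induction l with
  | nil => simp
  | cons w t ih =>
    by_cases hw : w = []
    · simpa [spaceSplitStep, hw, List.filter_cons] using ih
    · simp [spaceSplitStep, hw, foldl_step_nonempty, List.replicate_succ]

-- ===== VERDICT (by name: the statement is the Claim_ definition above) =====
theorem space_split_spec : Claim_equal_space_split := by
  intro text ls _
  show space_split text ls = space_split_alt text ls
  rw [space_split, space_split_alt, splitOn_eq_mySplit, foldl_step_empty,
    ssWords_eq_toks]
  rfl
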